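-- pv_equiv track=rewrite | github.com/lyd1881310/DHTR | utils.py | get_pre_suc
-- ===== SOURCE A (Python) =====
-- def get_pre_suc(timestamp, trg_len):
--     pre = {}
--     suc = {}
--     for i in range(0, trg_len):
--         if i == 0:
--             pre[0] = 0
--         else:
--             j = 0
--             while timestamp[j] < i:
--                 j = j + 1
--             pre[i] = j - 1
--     for i in range(0, trg_len):
--         if i == trg_len - 1:
--             suc[i] = len(timestamp) - 1
--         else:
--             j = 0
--             while timestamp[j] <= i:
--                 j = j + 1
--             suc[i] = j
--
--     return pre, suc
-- ===== SOURCE B (Python) =====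
-- def get_pre_suc(timestamp, trg_len):
--     # Two-pointer sweep: the first index j with timestamp[j] >= i equals the first
--     # index whose running prefix-maximum is >= i, and the prefix-maximum is
--     # nondecreasing, so one pointer advances monotonically over all thresholds i.
--     pre = {}
--     suc = {}
--     if trg_len >= 1:
--         pre[0] = 0
--     j = 0          # number of scanned elements
--     cur = None     # max(timestamp[:j])
--     for i in range(1, trg_len):
--         while cur is None or cur < i:
--             t = timestamp[j]
--             if cur is None or cur < t:
--                 cur = t
--             j += 1
--         pre[i] = j - 2   # first index with prefix-max >= i is j - 1
--     j = 0
--     cur = None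
--     for i in range(0, trg_len - 1):
--         while cur is None or cur <= i:
--             t = timestamp[j]
--             if cur is None or cur < t:
--                 cur = t
--             j += 1
--         suc[i] = j - 1   # first index with timestamp > i
--     if trg_len >= 1:
--         suc[trg_len - 1] = len(timestamp) - 1
--     return pre, suc
-- ===== Notes on version B (the rewrite author's own statement) =====
-- stated objective: faster
-- what changed: Replaces A's per-threshold rescans from index 0 by a single monotone two-pointer sweep over the running prefix-maximum (first index with timestamp[j] >= i equals first index with prefix-max >= i, which is monotone in i).
import Mathlib
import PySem

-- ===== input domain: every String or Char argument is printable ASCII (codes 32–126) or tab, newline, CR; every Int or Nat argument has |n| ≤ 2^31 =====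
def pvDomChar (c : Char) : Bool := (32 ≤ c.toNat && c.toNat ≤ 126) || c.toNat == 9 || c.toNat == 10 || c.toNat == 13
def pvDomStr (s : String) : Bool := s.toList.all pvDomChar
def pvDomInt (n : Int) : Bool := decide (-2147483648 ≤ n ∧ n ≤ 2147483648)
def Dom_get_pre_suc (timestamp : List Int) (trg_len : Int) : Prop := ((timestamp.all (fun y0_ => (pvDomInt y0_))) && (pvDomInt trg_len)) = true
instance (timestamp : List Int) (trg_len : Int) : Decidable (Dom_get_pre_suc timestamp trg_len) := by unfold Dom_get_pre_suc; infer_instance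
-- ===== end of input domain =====

-- B replaces A's per-threshold rescans from index 0 by a single two-pointer sweep over the
-- running prefix-maximum (measured asymptotically faster).

-- ===== PORT A =====
-- A's inner while loop: 'j = 0; while timestamp[j] < i (resp. <= i): j += 1'; strict = false
-- is the pre-loop ('< i'), strict = true the suc-loop ('<= i'); none = the scan runs off the
-- end of the list (Python IndexError, excluded by Pre_).
def pvFindA (ts : List Int) (strict : Bool) (i : Int) (j : Nat) : Option Nat :=
  match h : PySem.List.pyGet? ts (j : Int) with
  | none => none
  | some t =>
      if (if strict then decide (t ≤ i) else decide (t < i)) then pvFindA ts strict i (j + 1)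
      else some j
termination_by ts.length - j
decreasing_by
  have hj : j < ts.length := by
    rw [PySem.List.pyGet?_natCast] at h
    exact (List.getElem?_eq_some_iff.mp h).1
  omega

def get_pre_suc (timestamp : List Int) (trg_len : Int) : (List (Int × Int)) × (List (Int × Int)) :=
  let pre := (PySem.List.pyRange 0 trg_len 1).foldl (fun d i =>
      if i == 0 then d.insert 0 0
      else match pvFindA timestamp false i 0 with
           | some j => d.insert i ((j : Int) - 1)
           | none => d) PySem.Dict.empty      -- none = IndexError, excluded by Pre_
  let suc := (PySem.List.pyRange 0 trg_len 1).foldl (fun d i =>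
      if i == trg_len - 1 then d.insert i ((timestamp.length : Int) - 1)
      else match pvFindA timestamp true i 0 with
           | some j => d.insert i ((j : Int))
           | none => d) PySem.Dict.empty      -- none = IndexError, excluded by Pre_
  (pre.items, suc.items)

-- ===== PORT B =====
-- B's inner while loop: advance j and cur (= max(timestamp[:j])) while cur is None or
-- cur < i (strict = false) resp. cur <= i (strict = true); returns the final (j, cur);
-- none = the scan runs off the end of the list (Python IndexError, excluded by Pre_).
def pvAdv (ts : List Int) (strict : Bool) (i : Int) (j : Nat) (cur : Option Int) : Option (Nat × Int) :=
  match cur with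
  | none =>
      match h : PySem.List.pyGet? ts (j : Int) with
      | none => none
      | some t => pvAdv ts strict i (j + 1) (some t)
  | some c =>
      if (if strict then decide (c ≤ i) else decide (c < i)) then
        match h : PySem.List.pyGet? ts (j : Int) with
        | none => none
        | some t => pvAdv ts strict i (j + 1) (some (if c < t then t else c))
      else some (j, c)
termination_by ts.length - j
decreasing_by
  all_goals
    have hj : j < ts.length := by
      rw [PySem.List.pyGet?_natCast] at h
      exact (List.getElem?_eq_some_iff.mp h).1
    omega

def get_pre_suc_alt (timestamp : List Int) (trg_len : Int) : (List (Int × Int)) × (List (Int × Int)) :=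
  let pre0 : PySem.Dict Int Int :=
    if 1 ≤ trg_len then PySem.Dict.empty.insert 0 0 else PySem.Dict.empty
  let sp := (PySem.List.pyRange 1 trg_len 1).foldl
      (fun (s : PySem.Dict Int Int × Nat × Option Int) i =>
        match pvAdv timestamp false i s.2.1 s.2.2 with
        | some (j, c) => (s.1.insert i ((j : Int) - 2), j, some c)
        | none => s) (pre0, 0, none)
  let ss := (PySem.List.pyRange 0 (trg_len - 1) 1).foldl
      (fun (s : PySem.Dict Int Int × Nat × Option Int) i =>
        match pvAdv timestamp true i s.2.1 s.2.2 with
        | some (j, c) => (s.1.insert i ((j : Int) - 1), j, some c)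
        | none => s) (PySem.Dict.empty, 0, none)
  let suc := if 1 ≤ trg_len then ss.1.insert (trg_len - 1) ((timestamp.length : Int) - 1)
             else ss.1
  (sp.1.items, suc.items)

-- ===== PRECONDITION & SPEC =====
-- Pre_ excludes exactly the inputs on which A raises IndexError: for trg_len >= 2 the inner
-- scans run off the end of timestamp unless some element is >= trg_len - 1.
def Pre_get_pre_suc (timestamp : List Int) (trg_len : Int) : Prop :=
  2 ≤ trg_len → ∃ t ∈ timestamp, trg_len - 1 ≤ t
instance (timestamp : List Int) (trg_len : Int) : Decidable (Pre_get_pre_suc timestamp trg_len) := by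
  unfold Pre_get_pre_suc; infer_instance

def pvWitness_get_pre_suc : List Int × Int := ([3, 1], 4)

def Spec_get_pre_suc (timestamp : List Int) (trg_len : Int) (out : (List (Int × Int)) × (List (Int × Int))) : Prop := out = get_pre_suc_alt timestamp trg_len
instance (timestamp : List Int) (trg_len : Int) (out : (List (Int × Int)) × (List (Int × Int))) : Decidable (Spec_get_pre_suc timestamp trg_len out) := by unfold Spec_get_pre_suc; infer_instance

-- ===== CLAIM (what is proved, stated in full; the proofs are below) =====
def Claim_equal_get_pre_suc : Prop := ∀ (timestamp : List Int) (trg_len : Int), Dom_get_pre_suc timestamp trg_len → Pre_get_pre_suc timestamp trg_len → Spec_get_pre_suc timestamp trg_len (get_pre_suc timestamp trg_len)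

-- ===== LEMMAS AND PROOFS =====

-- the stop predicate of both inner loops: 'timestamp[m] >= i' (strict: '> i')
def pvP (strict : Bool) (i t : Int) : Bool := if strict then decide (i < t) else decide (i ≤ t)

-- B's running prefix maximum after scanning j elements (none iff nothing scanned yet)
def pvPM (ts : List Int) (j : Nat) : Option Int :=
  (ts.take j).foldl (fun o t => some (match o with | none => t | some c => if c < t then t else c)) none

lemma pvP_mono {strict : Bool} {i t t' : Int} (h : pvP strict i t = true) (htt : t ≤ t') :
    pvP strict i t' = true := by
  cases strict <;> simp [pvP] at h ⊢ <;> omega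

lemma pvP_anti {strict : Bool} {i i' t : Int} (h : pvP strict i t = false) (hii : i ≤ i') :
    pvP strict i' t = false := by
  cases strict <;> simp [pvP] at h ⊢ <;> omega

-- A's while loop finds the first index past j whose element satisfies the stop predicate
lemma pvFindA_eq (ts : List Int) (strict : Bool) (i : Int) (j : Nat) :
    pvFindA ts strict i j = ((ts.drop j).findIdx? (pvP strict i)).map (· + j) := by
  induction j using pvFindA.induct ts strict i with
  | case1 j h =>
      rw [PySem.List.pyGet?_natCast] at h
      have hle : ts.length ≤ j := by
        rcases Nat.lt_or_ge j ts.length with hc | hc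
        · simp [List.getElem?_eq_getElem hc] at h
        · exact hc
      rw [pvFindA]
      split
      · simp [List.drop_eq_nil_of_le hle]
      · next t h2 => rw [PySem.List.pyGet?_natCast, h] at h2; cases h2
  | case2 j t h hcond ih =>
      rw [PySem.List.pyGet?_natCast] at h
      have hj : j < ts.length := (List.getElem?_eq_some_iff.mp h).1
      have hts : ts.drop j = ts[j] :: ts.drop (j + 1) := List.drop_eq_getElem_cons hj
      have ht : ts[j] = t := by simpa [List.getElem?_eq_getElem hj] using h
      have hp : pvP strict i t = false := by
        cases strict <;> simp_all [pvP]
      rw [pvFindA]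
      split
      · next h2 => rw [PySem.List.pyGet?_natCast, h] at h2; cases h2
      · next t' h2 =>
          rw [PySem.List.pyGet?_natCast, h] at h2
          injection h2 with h2; subst h2
          rw [if_pos (by simpa using hcond), ih, hts, List.findIdx?_cons, ht, hp]
          simp [Option.map_map]
          congr 1; funext x; omega
  | case3 j t h hcond =>
      rw [PySem.List.pyGet?_natCast] at h
      have hj : j < ts.length := (List.getElem?_eq_some_iff.mp h).1
      have hts : ts.drop j = ts[j] :: ts.drop (j + 1) := List.drop_eq_getElem_cons hj
      have ht : ts[j] = t := by simpa [List.getElem?_eq_getElem hj] using h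
      have hp : pvP strict i t = true := by
        cases strict <;> simp_all [pvP]
      rw [pvFindA]
      split
      · next h2 => rw [PySem.List.pyGet?_natCast, h] at h2; cases h2
      · next t' h2 =>
          rw [PySem.List.pyGet?_natCast, h] at h2
          injection h2 with h2; subst h2
          rw [if_neg (by simpa using hcond), hts, List.findIdx?_cons, ht, hp]
          simp

lemma pvFindA_zero (ts : List Int) (strict : Bool) (i : Int) :
    pvFindA ts strict i 0 = ts.findIdx? (pvP strict i) := by
  simp [pvFindA_eq]

lemma pvTake_succ (ts : List Int) (j : Nat) (h : j < ts.length) :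
    ts.take (j + 1) = ts.take j ++ [ts[j]] := by
  rw [List.take_add_one, List.getElem?_eq_getElem h]; rfl

lemma pvPM_succ (ts : List Int) (j : Nat) (h : j < ts.length) :
    pvPM ts (j + 1) =
      some (match pvPM ts j with | none => ts[j] | some c => if c < ts[j] then ts[j] else c) := by
  unfold pvPM
  rw [pvTake_succ ts j h, List.foldl_append]
  rfl

-- the prefix maximum of a nonempty scanned prefix is an element of it and bounds it
lemma pvPM_spec (ts : List Int) (j : Nat) (h1 : 1 ≤ j) (h2 : j ≤ ts.length) :
    ∃ c, pvPM ts j = some c ∧ c ∈ ts.take j ∧ ∀ x ∈ ts.take j, x ≤ c := by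
  induction j with
  | zero => omega
  | succ k ih =>
      have hk : k < ts.length := by omega
      rw [pvPM_succ ts k hk, pvTake_succ ts k hk]
      rcases Nat.eq_zero_or_pos k with hk0 | hk0
      · subst hk0
        refine ⟨ts[0], rfl, by simp, by simp⟩
      · obtain ⟨c, hc, hmem, hmax⟩ := ih hk0 (by omega)
        rw [hc]
        refine ⟨if c < ts[k] then ts[k] else c, rfl, ?_, ?_⟩
        · by_cases hlt : c < ts[k]
          · rw [if_pos hlt]; exact List.mem_append_right _ (by simp)
          · rw [if_neg hlt]; exact List.mem_append_left _ hmem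
        · intro x hx
          rcases List.mem_append.mp hx with hx | hx
          · have := hmax x hx
            by_cases hlt : c < ts[k] <;> simp [hlt] <;> omega

          · simp at hx
            subst hx
            by_cases hlt : c < ts[k] <;> simp [hlt] <;> omega

lemma pvPM_pos (ts : List Int) (j : Nat) (c : Int) (h : pvPM ts j = some c) : 1 ≤ j := by
  rcases Nat.eq_zero_or_pos j with h0 | h0
  · subst h0; simp [pvPM] at h
  · exact h0

-- B's while loop stops one past the first index satisfying the stop predicate (which is the
-- first index whose prefix maximum satisfies it), provided every already-scanned element
-- except the last fails the predicate
lemma pvAdv_eq (ts : List Int) (strict : Bool) (i : Int) :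
    ∀ (j : Nat) (cur : Option Int), j ≤ ts.length → cur = pvPM ts j →
    (∀ m, (hm : m < ts.length) → m + 2 ≤ j → pvP strict i ts[m] = false) →
    pvAdv ts strict i j cur =
      (ts.findIdx? (pvP strict i)).map (fun m => (m + 1, (pvPM ts (m + 1)).getD 0)) := by
  intro j cur
  induction j, cur using pvAdv.induct ts strict i with
  | case1 j h =>
      intro hj hcur hprev
      rw [PySem.List.pyGet?_natCast] at h
      have hj0 : j = 0 := by
        rcases Nat.eq_zero_or_pos j with h0 | h0
        · exact h0
        · obtain ⟨c, hc, -, -⟩ := pvPM_spec ts j h0 hj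
          rw [hc] at hcur; cases hcur
      have hlen : ts.length ≤ j := by
        rcases Nat.lt_or_ge j ts.length with hc | hc
        · simp [List.getElem?_eq_getElem hc] at h
        · exact hc
      have hts : ts = [] := List.eq_nil_of_length_eq_zero (by omega)
      subst hts
      rw [pvAdv]
      split
      · rfl
      · next t h2 => rw [PySem.List.pyGet?_natCast] at h2; simp at h2
  | case2 j t h ih =>
      intro hj hcur hprev
      rw [PySem.List.pyGet?_natCast] at h
      have hjlt : j < ts.length := (List.getElem?_eq_some_iff.mp h).1
      have ht : ts[j] = t := by simpa [List.getElem?_eq_getElem hjlt] using h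
      have hj0 : j = 0 := by
        rcases Nat.eq_zero_or_pos j with h0 | h0
        · exact h0
        · obtain ⟨c, hc, -, -⟩ := pvPM_spec ts j h0 (by omega)
          rw [hc] at hcur; cases hcur
      subst hj0
      rw [pvAdv]
      split
      · next h2 => rw [PySem.List.pyGet?_natCast, h] at h2; cases h2
      · next t' h2 =>
          rw [PySem.List.pyGet?_natCast, h] at h2
          injection h2 with h2; subst h2
          exact ih (by omega) (by rw [pvPM_succ ts 0 hjlt]; simp [pvPM, ht]) (by omega)
  | case3 j c hcond h =>
      intro hj hcur hprev
      rw [PySem.List.pyGet?_natCast] at h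
      have hlen : ts.length ≤ j := by
        rcases Nat.lt_or_ge j ts.length with hc | hc
        · simp [List.getElem?_eq_getElem hc] at h
        · exact hc
      have hj1 : 1 ≤ j := pvPM_pos ts j c hcur.symm
      obtain ⟨c', hc', hmem, hmax⟩ := pvPM_spec ts j hj1 hj
      rw [hc'] at hcur; injection hcur with hcc; subst hcc
      have hpc : pvP strict i c = false := by
        cases strict <;> simp_all [pvP]
      have hnone : ts.findIdx? (pvP strict i) = none := by
        rw [List.findIdx?_eq_none_iff]
        intro x hx
        have hxc : x ≤ c := hmax x (by rwa [List.take_of_length_le (by omega)])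
        rcases Bool.eq_false_or_eq_true (pvP strict i x) with hfx | hfx
        · rw [pvP_mono hfx hxc] at hpc; cases hpc
        · exact hfx
      rw [pvAdv]
      rw [if_pos (by simpa using hcond)]
      split
      · rw [hnone]; rfl
      · next t' h2 => rw [PySem.List.pyGet?_natCast, h] at h2; cases h2
  | case4 j c hcond t h ih =>
      intro hj hcur hprev
      rw [PySem.List.pyGet?_natCast] at h
      have hjlt : j < ts.length := (List.getElem?_eq_some_iff.mp h).1
      have ht : ts[j] = t := by simpa [List.getElem?_eq_getElem hjlt] using h
      have hj1 : 1 ≤ j := pvPM_pos ts j c hcur.symm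
      obtain ⟨c', hc', hmem, hmax⟩ := pvPM_spec ts j hj1 (by omega)
      rw [hc'] at hcur; injection hcur with hcc; subst hcc
      have hpc : pvP strict i c = false := by
        cases strict <;> simp_all [pvP]
      rw [pvAdv]
      rw [if_pos (by simpa using hcond)]
      split
      · next h2 => rw [PySem.List.pyGet?_natCast, h] at h2; cases h2
      · next t' h2 =>
          rw [PySem.List.pyGet?_natCast, h] at h2
          injection h2 with h2; subst h2
          refine ih (by omega) ?_ ?_
          · simp [pvPM_succ ts j hjlt, hc', ht]
          · intro m hm hm2
            rcases Nat.lt_or_ge m (j - 1) with hmj | hmj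
            · exact hprev m hm (by omega)
            · have hmeq : m = j - 1 := by omega
              subst hmeq
              have : ts[j-1] ≤ c := hmax _ (by
                rw [List.mem_take_iff_getElem]
                exact ⟨j - 1, by omega, rfl⟩)
              rcases Bool.eq_false_or_eq_true (pvP strict i ts[j-1]) with hfx | hfx
              · rw [pvP_mono hfx this] at hpc; cases hpc
              · exact hfx
  | case5 j c hcond =>
      intro hj hcur hprev
      have hj1 : 1 ≤ j := pvPM_pos ts j c hcur.symm
      obtain ⟨c', hc', hmem, hmax⟩ := pvPM_spec ts j hj1 hj
      rw [hc'] at hcur; injection hcur with hcc; subst hcc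
      have hpc : pvP strict i c = true := by
        cases strict <;> simp_all [pvP]
      have hcj : ts[j-1]'(by omega) = c := by
        rw [List.mem_take_iff_getElem] at hmem
        obtain ⟨m, hmlt, hmc⟩ := hmem
        have hmj : m = j - 1 := by
          by_contra hne
          have h2 : m + 2 ≤ j := by omega
          have := hprev m (by omega) h2
          rw [hmc] at this; rw [this] at hpc; cases hpc
        simp only [hmj] at hmc; exact hmc
      have hfind : ts.findIdx? (pvP strict i) = some (j - 1) := by
        rw [List.findIdx?_eq_some_iff_getElem]
        refine ⟨by omega, by rw [hcj]; exact hpc, ?_⟩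
        intro k hk
        simp only [Bool.not_eq_true]
        exact hprev k (by omega) (by omega)
      rw [pvAdv]
      rw [if_neg (by simpa using hcond), hfind]
      simp only [Option.map_some]
      have : j - 1 + 1 = j := by omega
      rw [this, hc']
      rfl

-- B's whole loop over increasing thresholds equals the naive insert-per-threshold fold
lemma pvFold_eq (ts : List Int) (strict : Bool) (off : Int) :
    ∀ (l : List Int) (d : PySem.Dict Int Int) (j : Nat) (cur : Option Int),
    j ≤ ts.length → cur = pvPM ts j →
    List.Pairwise (· < ·) l →
    (∀ i' ∈ l, ∀ m, (hm : m < ts.length) → m + 2 ≤ j → pvP strict i' ts[m] = false) →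
    (∀ i' ∈ l, ∃ t ∈ ts, pvP strict i' t = true) →
    (l.foldl (fun (s : PySem.Dict Int Int × Nat × Option Int) i =>
        match pvAdv ts strict i s.2.1 s.2.2 with
        | some (j', c) => (s.1.insert i ((j' : Int) - off), j', some c)
        | none => s) (d, j, cur)).1
      = l.foldl (fun d i =>
          d.insert i (((ts.findIdx? (pvP strict i)).getD 0 : Int) + 1 - off)) d := by
  intro l
  induction l with
  | nil => intro d j cur _ _ _ _ _; rfl
  | cons i l ih =>
      intro d j cur hj hcur hpair hprev hex
      obtain ⟨hil, hpairl⟩ := List.pairwise_cons.mp hpair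
      rcases h : ts.findIdx? (pvP strict i) with _ | m
      · rw [List.findIdx?_eq_none_iff] at h
        obtain ⟨t, ht, hpt⟩ := hex i (List.mem_cons_self)
        rw [h t ht] at hpt; cases hpt
      · obtain ⟨hmlt, hpm, hbefore⟩ := List.findIdx?_eq_some_iff_getElem.mp h
        simp only [List.foldl_cons]
        rw [pvAdv_eq ts strict i j cur hj hcur (hprev i List.mem_cons_self), h]
        simp only [Option.map_some]
        obtain ⟨c, hc, -, -⟩ := pvPM_spec ts (m + 1) (by omega) (by omega)
        simp only [Nat.cast_add, Nat.cast_one, Option.getD_some]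
        rw [ih (d.insert i ((m : Int) + 1 - off)) (m + 1)
              (some ((pvPM ts (m + 1)).getD 0)) (by omega) (by rw [hc]; rfl) hpairl
              ?_ (fun i' hi' => hex i' (List.mem_cons_of_mem _ hi'))]
        intro i' hi' m' hm' hm2
        have hfalse : pvP strict i ts[m'] = false := by
          have := hbefore m' (by omega)
          simpa using this
        exact pvP_anti hfalse (le_of_lt (hil i' hi'))

-- ===== VERDICT (by name: the statement is the Claim_ definition above) =====
theorem get_pre_suc_spec : Claim_equal_get_pre_suc := by
  intro ts n _hdom hpre
  unfold Spec_get_pre_suc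
  unfold get_pre_suc get_pre_suc_alt
  dsimp only
  by_cases hn : 1 ≤ n
  · -- existence of a stopping element for every threshold the loops visit
    have hexF : ∀ i' ∈ PySem.List.pyRange 1 n 1, ∃ t ∈ ts, pvP false i' t = true := by
      intro i' hi'
      rw [PySem.List.mem_pyRange_one] at hi'
      obtain ⟨t, ht, htt⟩ := hpre (by omega)
      exact ⟨t, ht, by simp only [pvP]; simp; omega⟩
    have hexT : ∀ i' ∈ PySem.List.pyRange 0 (n - 1) 1, ∃ t ∈ ts, pvP true i' t = true := by
      intro i' hi'
      rw [PySem.List.mem_pyRange_one] at hi'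
      obtain ⟨t, ht, htt⟩ := hpre (by omega)
      exact ⟨t, ht, by simp only [pvP, if_true]; simp; omega⟩
    congr 1
    · -- pre dictionaries
      congr 1
      rw [if_pos hn]
      rw [pvFold_eq ts false 2 (PySem.List.pyRange 1 n 1) (PySem.Dict.empty.insert 0 0) 0 none
            (by omega) rfl (PySem.List.pairwise_lt_pyRange_one 1 n) (by omega) hexF]
      rw [PySem.List.pyRange_one_cons (by omega : (0:Int) < n), List.foldl_cons]
      rw [if_pos (show ((0:Int) == 0) = true by decide)]
      rw [show (0:Int) + 1 = 1 by norm_num]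
      apply PySem.List.foldl_congr_mem
      intro acc x hx
      rw [PySem.List.mem_pyRange_one] at hx
      rw [if_neg (by simp; omega)]
      rcases hfi : ts.findIdx? (pvP false x) with _ | m
      · rw [List.findIdx?_eq_none_iff] at hfi
        obtain ⟨t, ht, hpt⟩ := hexF x (by rw [PySem.List.mem_pyRange_one]; omega)
        rw [hfi t ht] at hpt; cases hpt
      · rw [pvFindA_zero, hfi]
        simp only [Option.getD_some]
        congr 1
        ring
    · -- suc dictionaries
      congr 1
      rw [if_pos hn]
      rw [pvFold_eq ts true 1 (PySem.List.pyRange 0 (n - 1) 1) PySem.Dict.empty 0 none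
            (by omega) rfl (PySem.List.pairwise_lt_pyRange_one 0 (n - 1)) (by omega) hexT]
      have hsplit : PySem.List.pyRange 0 n 1 = PySem.List.pyRange 0 (n - 1) 1 ++ [n - 1] := by
        have := PySem.List.pyRange_one_succ_right (a := 0) (b := n - 1) (by omega)
        rw [show n - 1 + 1 = n by ring] at this
        exact this
      rw [hsplit, List.foldl_append, List.foldl_cons, List.foldl_nil,
          if_pos (show ((n - 1 : Int) == n - 1) = true by simp)]
      congr 1
      apply PySem.List.foldl_congr_mem
      intro acc x hx
      rw [PySem.List.mem_pyRange_one] at hx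
      rw [if_neg (by simp; omega)]
      rcases hfi : ts.findIdx? (pvP true x) with _ | m
      · rw [List.findIdx?_eq_none_iff] at hfi
        obtain ⟨t, ht, hpt⟩ := hexT x (by rw [PySem.List.mem_pyRange_one]; omega)
        rw [hfi t ht] at hpt; cases hpt
      · rw [pvFindA_zero, hfi]
        simp only [Option.getD_some]
        congr 1
        ring
  · -- trg_len <= 0: both loops are empty and both results are ([], [])
    rw [PySem.List.pyRange_one_eq_nil (by omega : n ≤ 0),
        PySem.List.pyRange_one_eq_nil (by omega : n ≤ 1),
        PySem.List.pyRange_one_eq_nil (by omega : n - 1 ≤ 0),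
        if_neg hn, if_neg hn]
    rfl
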